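-- pv_equiv track=rewrite | github.com/asafelobotomy/reshadelinux | .github/hooks/scripts/pulse_runtime.py | route_roster_text
-- ===== SOURCE A (Python) =====
-- def route_roster_text(manifest: dict) -> str:
--     direct = []
--     internal = []
--     guarded = []
--     for entry in manifest.get("agents", []):
--         route_mode = str(entry.get("route") or "inactive")
--         if route_mode not in {"active", "guarded"}:
--             continue
--         name = str(entry.get("name") or "")
--         visibility = str(entry.get("visibility") or "internal")
--         if route_mode == "guarded":
--             guarded.append(name)
--         elif visibility == "picker-visible":
--             direct.append(name)
--         else:
--             internal.append(name)
--     parts = []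
--     if direct:
--         parts.append("specialists: " + ", ".join(direct))
--     if internal:
--         parts.append("internal: " + ", ".join(internal))
--     if guarded:
--         parts.append("guarded: " + ", ".join(guarded))
--     return " | ".join(parts)
-- ===== SOURCE B (Python) =====
-- def _field(entry, key, default):
--     value = entry.get(key) or ""
--     return str(value) if value != "" else default
--
--
-- def route_roster_text(manifest: dict) -> str:
--     agents = manifest.get("agents", [])
--     specialists = [_field(e, "name", "") for e in agents
--                    if _field(e, "route", "inactive") == "active"
--                    and _field(e, "visibility", "internal") == "picker-visible"]
--     internal = [_field(e, "name", "") for e in agents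
--                 if _field(e, "route", "inactive") == "active"
--                 and _field(e, "visibility", "internal") != "picker-visible"]
--     guarded = [_field(e, "name", "") for e in agents
--                if _field(e, "route", "inactive") == "guarded"]
--     segments = [("specialists: ", specialists),
--                 ("internal: ", internal),
--                 ("guarded: ", guarded)]
--     return " | ".join(label + ", ".join(names)
--                       for label, names in segments if names)
-- ===== Notes on version B (the rewrite author's own statement) =====
-- stated objective: alternative
-- what changed: Replaces the single pass with three-way branching into an accumulating triple by one filter+map pass per output category (specialists, internal, guarded) and a declarative segment table joined at the end.
import Mathlib
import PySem

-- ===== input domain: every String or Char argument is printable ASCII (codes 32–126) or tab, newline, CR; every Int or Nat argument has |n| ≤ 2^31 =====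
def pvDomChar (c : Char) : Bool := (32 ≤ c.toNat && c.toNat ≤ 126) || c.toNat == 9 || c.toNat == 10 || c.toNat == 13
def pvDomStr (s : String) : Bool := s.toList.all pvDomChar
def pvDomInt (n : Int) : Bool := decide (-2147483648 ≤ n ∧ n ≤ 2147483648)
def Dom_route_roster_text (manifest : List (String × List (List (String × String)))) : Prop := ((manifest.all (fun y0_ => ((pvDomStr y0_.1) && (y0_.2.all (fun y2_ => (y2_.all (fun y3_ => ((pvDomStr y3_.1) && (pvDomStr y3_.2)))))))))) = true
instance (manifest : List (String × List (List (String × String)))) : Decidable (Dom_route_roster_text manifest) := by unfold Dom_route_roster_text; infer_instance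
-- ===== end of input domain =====

-- B replaces A's single three-way-branching pass by one filter+map pass per category; alternative decomposition, same cost.


-- ===== PORT A =====
-- one pass over the agents, appending each kept name to one of three accumulator lists
def pvStepA (acc : List String × List String × List String) (entry : List (String × String)) :
    List String × List String × List String :=
  let route_mode := match List.lookup "route" entry with      -- str(entry.get("route") or "inactive")
    | some s => if s = "" then "inactive" else s
    | none => "inactive"
  if route_mode ≠ "active" ∧ route_mode ≠ "guarded" then acc
  else
    let name := match List.lookup "name" entry with           -- str(entry.get("name") or "")
      | some s => if s = "" then "" else s
      | none => ""
    let visibility := match List.lookup "visibility" entry with  -- str(entry.get("visibility") or "internal")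
      | some s => if s = "" then "internal" else s
      | none => "internal"
    if route_mode = "guarded" then (acc.1, acc.2.1, acc.2.2 ++ [name])
    else if visibility = "picker-visible" then (acc.1 ++ [name], acc.2.1, acc.2.2)
    else (acc.1, acc.2.1 ++ [name], acc.2.2)

def route_roster_text (manifest : List (String × List (List (String × String)))) : String :=
  let agents := (List.lookup "agents" manifest).getD []
  let acc := agents.foldl pvStepA ([], [], [])
  let parts : List String := []
  let parts := if acc.1 = [] then parts else parts ++ ["specialists: " ++ PySem.Str.join ", " acc.1]
  let parts := if acc.2.1 = [] then parts else parts ++ ["internal: " ++ PySem.Str.join ", " acc.2.1]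
  let parts := if acc.2.2 = [] then parts else parts ++ ["guarded: " ++ PySem.Str.join ", " acc.2.2]
  PySem.Str.join " | " parts

-- ===== PORT B =====
-- _field(entry, key, default) = str(entry.get(key) or "") if non-empty else default
def pvField (entry : List (String × String)) (key dflt : String) : String :=
  let value := (List.lookup key entry).getD ""
  if value ≠ "" then value else dflt

def route_roster_text_alt (manifest : List (String × List (List (String × String)))) : String :=
  let agents := (List.lookup "agents" manifest).getD []
  let specialists := (agents.filter (fun e =>
      pvField e "route" "inactive" == "active" && pvField e "visibility" "internal" == "picker-visible")).map
      (fun e => pvField e "name" "")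
  let internal := (agents.filter (fun e =>
      pvField e "route" "inactive" == "active" && !(pvField e "visibility" "internal" == "picker-visible"))).map
      (fun e => pvField e "name" "")
  let guarded := (agents.filter (fun e => pvField e "route" "inactive" == "guarded")).map
      (fun e => pvField e "name" "")
  let segments := [("specialists: ", specialists), ("internal: ", internal), ("guarded: ", guarded)]
  PySem.Str.join " | " ((segments.filter (fun p => !p.2.isEmpty)).map
      (fun p => p.1 ++ PySem.Str.join ", " p.2))

-- ===== PRECONDITION & SPEC =====
def Spec_route_roster_text (manifest : List (String × List (List (String × String)))) (out : String) : Prop := out = route_roster_text_alt manifest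
instance (manifest : List (String × List (List (String × String)))) (out : String) : Decidable (Spec_route_roster_text manifest out) := by unfold Spec_route_roster_text; infer_instance

-- ===== CLAIM (what is proved, stated in full; the proofs are below) =====
def Claim_equal_route_roster_text : Prop := ∀ (manifest : List (String × List (List (String × String)))), Dom_route_roster_text manifest → Spec_route_roster_text manifest (route_roster_text manifest)

-- ===== LEMMAS AND PROOFS =====

-- A's inline 'str(entry.get(k) or d)' normalization equals B's pvField
theorem pvNorm_eq (entry : List (String × String)) (k d : String) :
    (match List.lookup k entry with
      | some s => if s = "" then d else s
      | none => d) = pvField entry k d := by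
  cases h : List.lookup k entry with
  | none => unfold pvField; rw [h]; simp
  | some s =>
    by_cases hs : s = "" <;> simp [pvField, h, hs]

-- the three category lists B produces, as functions of the agent list
def pvSp (agents : List (List (String × String))) : List String :=
  (agents.filter (fun e =>
      pvField e "route" "inactive" == "active" && pvField e "visibility" "internal" == "picker-visible")).map
      (fun e => pvField e "name" "")
def pvIn (agents : List (List (String × String))) : List String :=
  (agents.filter (fun e =>
      pvField e "route" "inactive" == "active" && !(pvField e "visibility" "internal" == "picker-visible"))).map
      (fun e => pvField e "name" "")
def pvGd (agents : List (List (String × String))) : List String :=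
  (agents.filter (fun e => pvField e "route" "inactive" == "guarded")).map
      (fun e => pvField e "name" "")

theorem pvSp_cons (e : List (String × String)) (rest : List (List (String × String))) :
    pvSp (e :: rest) = pvSp [e] ++ pvSp rest := by
  unfold pvSp; rw [List.filter_cons]; split <;> rename_i h <;> simp [h]

theorem pvIn_cons (e : List (String × String)) (rest : List (List (String × String))) :
    pvIn (e :: rest) = pvIn [e] ++ pvIn rest := by
  unfold pvIn; rw [List.filter_cons]; split <;> rename_i h <;> simp [h]

theorem pvGd_cons (e : List (String × String)) (rest : List (List (String × String))) :
    pvGd (e :: rest) = pvGd [e] ++ pvGd rest := by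
  unfold pvGd; rw [List.filter_cons]; split <;> rename_i h <;> simp [h]

theorem pvFold_eq (agents : List (List (String × String))) :
    ∀ d i g : List String,
      agents.foldl pvStepA (d, i, g) = (d ++ pvSp agents, i ++ pvIn agents, g ++ pvGd agents) := by
  induction agents with
  | nil => intro d i g; simp [pvSp, pvIn, pvGd]
  | cons e rest ih =>
    intro d i g
    have hstep : pvStepA (d, i, g) e =
        (d ++ pvSp [e], i ++ pvIn [e], g ++ pvGd [e]) := by
      unfold pvStepA pvSp pvIn pvGd
      rw [pvNorm_eq e "route" "inactive", pvNorm_eq e "name" "",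
        pvNorm_eq e "visibility" "internal"]
      by_cases hr : pvField e "route" "inactive" = "active" <;>
        by_cases hg : pvField e "route" "inactive" = "guarded" <;>
          by_cases hv : pvField e "visibility" "internal" = "picker-visible" <;>
            simp [hr, hg, hv]
    rw [List.foldl_cons, hstep, ih, pvSp_cons e rest, pvIn_cons e rest, pvGd_cons e rest]
    simp [List.append_assoc]

theorem route_roster_text_spec : Claim_equal_route_roster_text := by
  intro m _
  have halt : route_roster_text_alt m = PySem.Str.join " | "
      (([("specialists: ", pvSp ((List.lookup "agents" m).getD [])),
         ("internal: ", pvIn ((List.lookup "agents" m).getD [])),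
         ("guarded: ", pvGd ((List.lookup "agents" m).getD []))].filter
        (fun p => !p.2.isEmpty)).map (fun p => p.1 ++ PySem.Str.join ", " p.2)) := rfl
  simp only [Spec_route_roster_text, route_roster_text, halt, pvFold_eq, List.nil_append]
  by_cases h1 : pvSp ((List.lookup "agents" m).getD []) = [] <;>
    by_cases h2 : pvIn ((List.lookup "agents" m).getD []) = [] <;>
      by_cases h3 : pvGd ((List.lookup "agents" m).getD []) = [] <;>
        simp [h1, h2, h3]
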